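-- pv_equiv track=rewrite | github.com/pypi-data/pypi-mirror-400 | packages/chgksuite/chgksuite-0.27.0b5.tar.gz/chgksuite-0.27.0b5/chgksuite/composer/chgksuite_parser.py | find_heading
-- ===== SOURCE A (Python) =====
-- def find_heading(structure):
--     h_id = -1
--     for e, x in enumerate(structure):
--         if x[0] == "ljheading":
--             return (e, x)
--         elif x[0] == "heading":
--             h_id = e
--     if h_id >= 0:
--         return (h_id, structure[h_id])
--     return None
-- ===== SOURCE B (Python) =====
-- def find_heading(structure):
--     lj = next(((e, x) for e, x in enumerate(structure) if x[0] == "ljheading"), None)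
--     if lj is not None:
--         return lj
--     last = None
--     for e, x in enumerate(structure):
--         if x[0] == "heading":
--             last = (e, x)
--     return last
-- ===== Notes on version B (the rewrite author's own statement) =====
-- stated objective: alternative
-- what changed: Replaces A's single early-returning scan that tracks a heading index and re-indexes the list at the end with two independent passes (first-ljheading via next/enumerate, last-heading via a forward scan keeping the latest pair) combined by a final decision; no re-indexing.
import Mathlib
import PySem

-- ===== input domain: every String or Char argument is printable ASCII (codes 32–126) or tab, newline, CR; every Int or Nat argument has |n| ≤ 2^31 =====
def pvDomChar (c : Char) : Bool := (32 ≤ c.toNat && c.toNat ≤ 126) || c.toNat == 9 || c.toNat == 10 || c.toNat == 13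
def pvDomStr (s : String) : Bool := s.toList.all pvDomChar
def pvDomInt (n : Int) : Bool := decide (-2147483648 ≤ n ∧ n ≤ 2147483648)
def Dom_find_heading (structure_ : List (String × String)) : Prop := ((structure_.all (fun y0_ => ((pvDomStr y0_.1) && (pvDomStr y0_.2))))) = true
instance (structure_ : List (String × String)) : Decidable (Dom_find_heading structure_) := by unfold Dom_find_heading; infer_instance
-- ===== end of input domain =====

-- B replaces A's single early-returning scan (tracking h_id, re-indexing at the end)
-- with two independent passes combined by a final decision (alternative decomposition; same cost).

-- ===== PORT A =====
-- A's for-loop over enumerate(structure) with early return, carrying h_id; at the end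
-- structure[h_id] is looked up (pyGet?; none = IndexError, unreachable since h_id is a seen index).
def findHeadingLoop (structure_ : List (String × String)) :
    List (Int × (String × String)) → Int → Option (Int × (String × String))
  | [], h_id =>
    if h_id ≥ 0 then
      match PySem.List.pyGet? structure_ h_id with
      | some x => some (h_id, x)
      | none => none
    else none
  | (e, x) :: rest, h_id =>
    if x.1 == "ljheading" then some (e, x)
    else if x.1 == "heading" then findHeadingLoop structure_ rest e
    else findHeadingLoop structure_ rest h_id

def find_heading (structure_ : List (String × String)) : Option (Int × (String × String)) :=
  findHeadingLoop structure_ (PySem.List.enumerate structure_ 0) (-1)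

-- ===== PORT B =====
-- first element tagged "ljheading" (next over enumerate)
def firstLj (structure_ : List (String × String)) : Option (Int × (String × String)) :=
  (PySem.List.enumerate structure_ 0).find? (fun p => p.2.1 == "ljheading")

-- forward scan keeping the latest element tagged "heading"
def lastHeading (structure_ : List (String × String)) : Option (Int × (String × String)) :=
  (PySem.List.enumerate structure_ 0).foldl
    (fun acc p => if p.2.1 == "heading" then some p else acc) none

def find_heading_alt (structure_ : List (String × String)) : Option (Int × (String × String)) :=
  match firstLj structure_ with
  | some p => some p
  | none => lastHeading structure_

-- ===== PRECONDITION & SPEC =====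
def Spec_find_heading (structure_ : List (String × String)) (out : Option (Int × (String × String))) : Prop := out = find_heading_alt structure_
instance (structure_ : List (String × String)) (out : Option (Int × (String × String))) : Decidable (Spec_find_heading structure_ out) := by unfold Spec_find_heading; infer_instance

-- ===== CLAIM (what is proved, stated in full; the proofs are below) =====
def Claim_equal_find_heading : Prop := ∀ (structure_ : List (String × String)), Dom_find_heading structure_ → Spec_find_heading structure_ (find_heading structure_)

-- ===== LEMMAS AND PROOFS =====

-- Loop invariant: on any tail l of enumerate(s) whose pairs are genuine indexed entries of s,
-- A's loop with accumulator h equals B's find?/foldl combination started from the matching acc.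
theorem findHeadingLoop_eq (structure_ : List (String × String))
    (l : List (Int × (String × String))) (h : Int)
    (acc : Option (Int × (String × String)))
    (Hl : ∀ p ∈ l, 0 ≤ p.1 ∧ PySem.List.pyGet? structure_ p.1 = some p.2)
    (Hacc : (h < 0 ∧ acc = none) ∨
            (0 ≤ h ∧ ∃ x, PySem.List.pyGet? structure_ h = some x ∧ acc = some (h, x))) :
    findHeadingLoop structure_ l h =
      match l.find? (fun p => p.2.1 == "ljheading") with
      | some p => some p
      | none => l.foldl (fun acc p => if p.2.1 == "heading" then some p else acc) acc := by
  induction l generalizing h acc with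
  | nil =>
    simp only [findHeadingLoop, List.find?_nil, List.foldl_nil]
    rcases Hacc with ⟨hlt, hacc⟩ | ⟨hge, x, hx, hacc⟩
    · rw [if_neg (by omega)]; exact hacc.symm
    · rw [if_pos (by omega), hx, hacc]
  | cons p rest ih =>
    obtain ⟨e, x⟩ := p
    simp only [findHeadingLoop, List.find?_cons, List.foldl_cons]
    by_cases hlj : x.1 == "ljheading"
    · simp [hlj]
    · rw [if_neg hlj]
      simp only [hlj]
      by_cases hh : x.1 == "heading"
      · rw [if_pos hh, if_pos hh]
        obtain ⟨he, hget⟩ := Hl (e, x) List.mem_cons_self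
        exact ih e (some (e, x)) (fun q hq => Hl q (List.mem_cons_of_mem _ hq))
          (Or.inr ⟨he, x, hget, rfl⟩)
      · rw [if_neg hh, if_neg hh]
        exact ih h acc (fun q hq => Hl q (List.mem_cons_of_mem _ hq)) Hacc

theorem enumerate_entries (structure_ : List (String × String)) :
    ∀ p ∈ PySem.List.enumerate structure_ 0,
      0 ≤ p.1 ∧ PySem.List.pyGet? structure_ p.1 = some p.2 := by
  intro p hp
  rw [PySem.List.mem_enumerate_iff] at hp
  obtain ⟨k, hk, rfl⟩ := hp
  simp [hk]

-- ===== VERDICT (by name: the statement is the Claim_ definition above) =====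
theorem find_heading_spec : Claim_equal_find_heading := by
  intro s _
  unfold Spec_find_heading find_heading find_heading_alt firstLj lastHeading
  rw [findHeadingLoop_eq s _ (-1) none (enumerate_entries s) (Or.inl ⟨by omega, rfl⟩)]
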